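-- pv_equiv track=rewrite | github.com/BrainDamage22/masters_thesis | util.py | calculate_route_costs_dmp
-- ===== SOURCE A (Python) =====
-- def calculate_route_costs_dmp(route, costsList):
--     costs = 0
--     n = len(route) - 1
--     k = 0
--
--     # Iterate through the route, summing the costs between each consecutive pair of nodes,
--     # while applying a decreasing multiplier penalty.
--     for i in range(len(route) - 1):
--         k += 1
--         costs += (n - k + 1) * costsList[route[i]][route[i + 1]]
--
--     # Return the total costs with the DMP applied.
--     return costs
-- ===== SOURCE B (Python) =====
-- def calculate_route_costs_dmp(route, costsList):
--     # Prefix-sum decomposition: the decreasing multipliers n..1 make the total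
--     # equal to the sum of running prefix sums of the edge costs.
--     total = 0
--     running = 0
--     for a, b in zip(route, route[1:]):
--         running += costsList[a][b]
--         total += running
--     return total
-- ===== Notes on version B (the rewrite author's own statement) =====
-- stated objective: simpler
-- what changed: Replaces the indexed loop with position-dependent multipliers (n-k+1) by a single pass over consecutive pairs maintaining a running prefix sum whose accumulation reproduces the decreasing weights, so no indices or multipliers are needed.
import Mathlib
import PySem

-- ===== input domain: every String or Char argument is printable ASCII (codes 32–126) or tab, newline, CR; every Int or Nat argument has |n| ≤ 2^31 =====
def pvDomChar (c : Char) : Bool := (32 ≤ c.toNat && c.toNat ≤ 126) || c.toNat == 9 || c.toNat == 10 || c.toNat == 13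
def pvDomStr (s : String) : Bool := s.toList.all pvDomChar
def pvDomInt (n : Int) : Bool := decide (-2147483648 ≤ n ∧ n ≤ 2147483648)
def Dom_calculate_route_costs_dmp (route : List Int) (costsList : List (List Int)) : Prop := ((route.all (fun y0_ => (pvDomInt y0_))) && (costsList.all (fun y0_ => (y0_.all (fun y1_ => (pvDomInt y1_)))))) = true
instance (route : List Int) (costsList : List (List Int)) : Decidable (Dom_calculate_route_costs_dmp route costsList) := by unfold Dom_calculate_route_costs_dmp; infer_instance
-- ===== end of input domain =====

-- B replaces A's indexed loop with decreasing multipliers by a single pass over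
-- consecutive pairs accumulating a running prefix sum (objective: simpler).

-- ===== PORT A =====
def calculate_route_costs_dmp (route : List Int) (costsList : List (List Int)) : Int :=
  -- costs = 0; n = len(route) - 1; k = 0
  let n : Int := (route.length : Int) - 1
  -- for i in range(len(route) - 1): k += 1; costs += (n - k + 1) * costsList[route[i]][route[i+1]]
  let st := (PySem.List.pyRange 0 ((route.length : Int) - 1) 1).foldl
    (fun (s : Int × Int) i =>
      let k := s.2 + 1
      (s.1 + (n - k + 1) *
        PySem.List.pyGetD
          (PySem.List.pyGetD costsList (PySem.List.pyGetD route i 0) [])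
          (PySem.List.pyGetD route (i + 1) 0) 0,
       k))
    (0, 0)
  st.1

-- ===== PORT B =====
def calculate_route_costs_dmp_alt (route : List Int) (costsList : List (List Int)) : Int :=
  -- total = 0; running = 0
  -- for a, b in zip(route, route[1:]): running += costsList[a][b]; total += running
  let st := (route.zip (PySem.List.slice route (some 1) none)).foldl
    (fun (s : Int × Int) p =>
      let running := s.2 + PySem.List.pyGetD (PySem.List.pyGetD costsList p.1 []) p.2 0
      (s.1 + running, running))
    (0, 0)
  st.1

-- ===== PRECONDITION & SPEC =====
-- Pre_ excludes exactly the inputs where Python A raises an IndexError: some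
-- consecutive pair of route values is not a valid (possibly negative) pair of
-- indices into costsList and its selected row.
def Pre_calculate_route_costs_dmp (route : List Int) (costsList : List (List Int)) : Prop :=
  ∀ p ∈ route.zip route.tail,
    ((PySem.List.pyGet? costsList p.1).bind
      (fun row => PySem.List.pyGet? row p.2)).isSome = true
instance (route : List Int) (costsList : List (List Int)) : Decidable (Pre_calculate_route_costs_dmp route costsList) := by unfold Pre_calculate_route_costs_dmp; infer_instance

def pvWitness_calculate_route_costs_dmp : List Int × List (List Int) :=
  ([0, 1], [[0, 1], [2, 3]])

def Spec_calculate_route_costs_dmp (route : List Int) (costsList : List (List Int)) (out : Int) : Prop := out = calculate_route_costs_dmp_alt route costsList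
instance (route : List Int) (costsList : List (List Int)) (out : Int) : Decidable (Spec_calculate_route_costs_dmp route costsList out) := by unfold Spec_calculate_route_costs_dmp; infer_instance

-- ===== CLAIM (what is proved, stated in full; the proofs are below) =====
def Claim_equal_calculate_route_costs_dmp : Prop := ∀ (route : List Int) (costsList : List (List Int)), Dom_calculate_route_costs_dmp route costsList → Pre_calculate_route_costs_dmp route costsList → Spec_calculate_route_costs_dmp route costsList (calculate_route_costs_dmp route costsList)

-- ===== LEMMAS AND PROOFS =====

-- the defaulted edge cost both ports use
def pvEdge (costsList : List (List Int)) (a b : Int) : Int :=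
  PySem.List.pyGetD (PySem.List.pyGetD costsList a []) b 0

-- weighted sum with decreasing multipliers len..1
def pvW : List Int → Int
  | [] => 0
  | c :: cs => ((cs.length : Int) + 1) * c + pvW cs

theorem pvB_fold (costsList : List (List Int)) :
    ∀ (ps : List (Int × Int)) (t r : Int),
      (ps.foldl (fun (s : Int × Int) p =>
          (s.1 + (s.2 + pvEdge costsList p.1 p.2), s.2 + pvEdge costsList p.1 p.2)) (t, r))
      = (t + ((ps.length : Int)) * r + pvW (ps.map (fun p => pvEdge costsList p.1 p.2)),
         r + (ps.map (fun p => pvEdge costsList p.1 p.2)).sum) := by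
  intro ps
  induction ps with
  | nil => intro t r; simp [pvW]
  | cons p ps ih =>
      intro t r
      simp only [List.foldl_cons, List.map_cons, List.length_cons, List.sum_cons, List.length_map, pvW, ih,
        Prod.mk.injEq]
      constructor <;> (push_cast; ring)

theorem pvA_fold (n : Int) (f : Nat → Int) :
    ∀ m : Nat,
      ((List.range m).foldl (fun (s : Int × Int) j => (s.1 + (n - (s.2 + 1) + 1) * f j, s.2 + 1)) (0, 0))
      = (∑ j ∈ Finset.range m, (n - (j : Int)) * f j, (m : Int)) := by
  intro m
  induction m with
  | zero => simp
  | succ m ih =>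
      rw [List.range_succ, List.foldl_append, ih, Finset.sum_range_succ]
      simp only [List.foldl_cons, List.foldl_nil, Prod.mk.injEq]
      constructor <;> (push_cast; ring)

theorem pvW_sum (es : List Int) :
    pvW es = ∑ j ∈ Finset.range es.length, ((es.length : Int) - (j : Int)) * es.getD j 0 := by
  induction es with
  | nil => simp [pvW]
  | cons c cs ih =>
      rw [pvW, ih, List.length_cons, Finset.sum_range_succ']
      simp
      ring

-- ===== VERDICT (by name: the statement is the Claim_ definition above) =====
theorem calculate_route_costs_dmp_spec : Claim_equal_calculate_route_costs_dmp := by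
  intro route costsList _ _
  unfold Spec_calculate_route_costs_dmp calculate_route_costs_dmp calculate_route_costs_dmp_alt
  cases route with
  | nil => simp [PySem.List.slice_from_one]
  | cons x rest =>
    rw [PySem.List.slice_from_one]
    have h1 : (((x :: rest).length : Int)) - 1 = ((rest.length : Int)) := by simp
    rw [h1, PySem.List.pyRange_one]
    simp only [Int.sub_zero, Int.toNat_natCast, List.foldl_map, zero_add,
      ← Nat.cast_add_one, PySem.List.pyGetD_natCast, List.tail_cons,
      ← pvEdge.eq_def]
    rw [pvA_fold ((rest.length : Int))
      (fun j => pvEdge costsList ((x :: rest).getD j 0) ((x :: rest).getD (j + 1) 0))]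
    rw [pvB_fold costsList ((x :: rest).zip rest) 0 0]
    simp only [mul_zero, add_zero, zero_add]
    rw [pvW_sum]
    have hlen : ((x :: rest).zip rest).length = rest.length := by
      simp [List.length_zip]
    rw [List.length_map, hlen]
    refine Finset.sum_congr rfl ?_
    intro j hj
    have hj' : j < rest.length := Finset.mem_range.mp hj
    have hgd : (((x :: rest).zip rest).map
        (fun p => pvEdge costsList p.1 p.2)).getD j 0
        = pvEdge costsList ((x :: rest).getD j 0) ((x :: rest).getD (j + 1) 0) := by
      rw [List.getD_eq_getElem _ _ (by simp [List.length_zip]; omega)]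
      simp only [List.getElem_map, List.getElem_zip]
      rw [List.getD_eq_getElem _ _ (by simp; omega), List.getD_eq_getElem _ _ (by simp; omega)]
      simp
    rw [hgd]
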